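-- pv_equiv track=rewrite | github.com/FISAAI03/FISAAI_CODING_TEST | Python/PGS/LEVEL2/서버 증설 횟수/조진원.py | solution
-- ===== SOURCE A (Python) =====
-- def solution(players, m, k):
--     server_expiry = [0 for _ in range(24)]  # 각 시간대에 만료될 서버 수를 기록하는 배열
--
--     answer = 0  # 총 서버 증설 횟수
--     n = 0       # 현재 운영 중인 서버 수
--
--     for hour, player in enumerate(players):
--         # 현재 시각에 만료되는 서버 수를 반영하여 현재 운영 중인 서버 수 업데이트
--         n += server_expiry[hour]
--
--         # 현재 운영 중인 서버 수(n)로 감당할 수 있는 최대 이용자 수는 (n * m)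
--         # 현재 이용자 수가 (n+1)*m 이상이면 서버를 증설해야 함
--         if player >= ((n + 1) * m):
--             # 추가로 필요한 서버 수 계산
--             add = (player - m * n) // m
--             n += add           # 현재 서버 수에 추가
--             answer += add      # 증설 횟수 누적
--
--             # 새로 증설한 서버들은 k시간 뒤에 만료되므로, 해당 시각에 반영
--             # 예: hour=3, k=5 → server_expiry[8]에 -add 기록
--             if hour + k < 24:
--                 server_expiry[hour + k] = -add  # k시간 후에 해당 서버 수만큼 만료 처리
--
--     return answer  # 최소 서버 증설 횟수 반환
-- ===== SOURCE B (Python) =====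
-- def solution(players, m, k):
--     # Instead of a 24-slot difference array with a running server count, keep a
--     # log of expansions (hour, add) and recompute the active count each hour as
--     # the sum of adds still within their k-hour lifetime.
--     adds = []
--     answer = 0
--     for hour, player in enumerate(players):
--         n = sum(a for h, a in adds if hour - k < h)
--         if player >= (n + 1) * m:
--             add = (player - m * n) // m
--             adds.append((hour, add))
--             answer += add
--     return answer
-- ===== Notes on version B (the rewrite author's own statement) =====
-- stated objective: alternative
-- what changed: Replaces the 24-slot difference array with a running server count by a log of expansion batches (hour, add), recomputing the active server count each hour as the sum of adds still within their k-hour lifetime.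
-- outside the precondition, e.g. on solution([5, 5, 5], 1, 0): A returns 5, B returns 15; on solution([10, 10], 3, -1): A returns 3, B returns 6
import Mathlib
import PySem

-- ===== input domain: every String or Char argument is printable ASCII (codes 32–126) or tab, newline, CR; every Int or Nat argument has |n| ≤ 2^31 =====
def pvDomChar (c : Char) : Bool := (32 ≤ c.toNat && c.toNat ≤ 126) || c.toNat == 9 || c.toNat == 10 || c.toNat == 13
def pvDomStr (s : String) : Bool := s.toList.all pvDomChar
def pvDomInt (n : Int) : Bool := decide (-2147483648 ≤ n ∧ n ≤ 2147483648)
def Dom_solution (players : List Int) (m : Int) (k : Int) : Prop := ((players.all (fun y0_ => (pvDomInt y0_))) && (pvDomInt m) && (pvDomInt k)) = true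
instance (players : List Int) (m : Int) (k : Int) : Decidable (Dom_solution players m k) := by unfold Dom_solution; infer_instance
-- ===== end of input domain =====

-- B replaces A's 24-slot difference array + running server count by a log of
-- expansion batches, recomputing the active count each hour (objective: alternative).

-- ===== PORT A =====
-- A's for loop over enumerate(players): state = (expiry array, answer, current n).
-- e[hour] read / e[hour+k] = -add written with PySem.List.pyGetD / pySetD; exact
-- under Pre_ (indices are then in [0, 24)).
def solutionLoop (m k : Int) : List Int → Int → List Int → Int → Int → Int
  | [], _, _, answer, _ => answer
  | p :: rest, hour, e, answer, n =>
    let n' := n + PySem.List.pyGetD e hour 0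
    if (n' + 1) * m ≤ p then
      let add := PySem.Int.floordiv (p - m * n') m
      let e' := if hour + k < 24 then PySem.List.pySetD e (hour + k) (-add) else e
      solutionLoop m k rest (hour + 1) e' (answer + add) (n' + add)
    else
      solutionLoop m k rest (hour + 1) e answer n'

def solution (players : List Int) (m : Int) (k : Int) : Int :=
  solutionLoop m k players 0 (List.replicate 24 0) 0 0

-- ===== PORT B =====
-- n = sum(a for h, a in adds if hour - k < h)
def altN (adds : List (Int × Int)) (hour k : Int) : Int :=
  ((adds.filter (fun ha => decide (hour - k < ha.1))).map Prod.snd).sum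

def solutionAltLoop (m k : Int) : List Int → Int → List (Int × Int) → Int → Int
  | [], _, _, answer => answer
  | p :: rest, hour, adds, answer =>
    let n := altN adds hour k
    if (n + 1) * m ≤ p then
      let add := PySem.Int.floordiv (p - m * n) m
      solutionAltLoop m k rest (hour + 1) (adds ++ [(hour, add)]) (answer + add)
    else
      solutionAltLoop m k rest (hour + 1) adds answer

def solution_alt (players : List Int) (m : Int) (k : Int) : Int :=
  solutionAltLoop m k players 0 [] 0

-- ===== PRECONDITION & SPEC =====
-- Pre_ excludes: len(players) > 24 (A raises IndexError at hour 24); m = 0 (A raises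
-- ZeroDivisionError at the first demand ≥ 0); and k ≤ 0, on which A's expiry slot hour+k
-- lies at or before the current hour (or wraps via Python's negative indexing), so batches
-- accidentally never expire — an artefact of the difference array on a degenerate
-- lifetime, while B expires them after k ≤ 0 hours.  Inputs where every demand is below m
-- stay inside for any m, k: no expansion is ever attempted, both return 0.
def Pre_solution (players : List Int) (m : Int) (k : Int) : Prop :=
  players.length ≤ 24 ∧ ((m ≠ 0 ∧ 1 ≤ k) ∨ ∀ p ∈ players, p < m)
instance (players : List Int) (m : Int) (k : Int) : Decidable (Pre_solution players m k) := by
  unfold Pre_solution; infer_instance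

def pvWitness_solution : List Int × Int × Int := ([300, 1000, 500, 200], 100, 2)

def Spec_solution (players : List Int) (m : Int) (k : Int) (out : Int) : Prop := out = solution_alt players m k
instance (players : List Int) (m : Int) (k : Int) (out : Int) : Decidable (Spec_solution players m k out) := by unfold Spec_solution; infer_instance

-- ===== CLAIM (what is proved, stated in full; the proofs are below) =====
def Claim_equal_solution : Prop := ∀ (players : List Int) (m : Int) (k : Int), Dom_solution players m k → Pre_solution players m k → Spec_solution players m k (solution players m k)

-- ===== LEMMAS AND PROOFS =====

-- splitting the active window at the expiry boundary
lemma sum_window_step (adds : List (Int × Int)) (t k : Int) :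
    ((adds.filter (fun ha => decide (t - 1 - k < ha.1))).map Prod.snd).sum
    = ((adds.filter (fun ha => decide (ha.1 + k = t))).map Prod.snd).sum
      + ((adds.filter (fun ha => decide (t - k < ha.1))).map Prod.snd).sum := by
  induction adds with
  | nil => simp
  | cons ha tl ih =>
    simp only [List.filter_cons]
    by_cases h1 : t - 1 - k < ha.1
    · by_cases h2 : ha.1 + k = t
      · have h3 : ¬ (t - k < ha.1) := by omega
        simp [h1, h2, h3, ih]; ring
      · have h3 : t - k < ha.1 := by omega
        simp [h1, h2, h3, ih]; ring
    · have h2 : ¬ (ha.1 + k = t) := by omega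
      have h3 : ¬ (t - k < ha.1) := by omega
      simp [h1, h2, h3, ih]

-- batches recorded so far all started strictly before t, so none expires at hour ≥ t + k
lemma filter_expiry_nil (adds : List (Int × Int)) (t k i : Int)
    (hadds : ∀ ha ∈ adds, ha.1 < t) (hi : t + k ≤ i) :
    adds.filter (fun ha => decide (ha.1 + k = i)) = [] := by
  induction adds with
  | nil => rfl
  | cons ha tl ih =>
    have h1 : ha.1 < t := hadds ha (by simp)
    have h2 : ¬ (ha.1 + k = i) := by omega
    simp only [List.filter_cons, h2, decide_false]
    exact ih (fun x hx => hadds x (by simp [hx]))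

-- the loop invariant: A's running count and expiry array are described by B's log
lemma loops_eq (m k : Int) (hk : 1 ≤ k) :
    ∀ (rest : List Int) (t : Int) (e : List Int) (ans n : Int) (adds : List (Int × Int)),
    0 ≤ t → t + rest.length ≤ 24 → e.length = 24 →
    n = altN adds (t - 1) k →
    (∀ ha ∈ adds, ha.1 < t) →
    (∀ i : Int, t ≤ i → i < 24 →
      PySem.List.pyGetD e i 0
        = -(((adds.filter (fun ha => decide (ha.1 + k = i))).map Prod.snd).sum)) →
    solutionLoop m k rest t e ans n = solutionAltLoop m k rest t adds ans := by
  intro rest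
  induction rest with
  | nil => intro t e ans n adds _ _ _ _ _ _; rfl
  | cons p rest ih =>
    intro t e ans n adds ht hlen he hn hadds hei
    have hlen' : t + (rest.length : Int) + 1 ≤ 24 := by
      simp only [List.length_cons] at hlen; push_cast at hlen ⊢; omega
    have ht24 : t < 24 := by omega
    have hread : PySem.List.pyGetD e t 0
        = -(((adds.filter (fun ha => decide (ha.1 + k = t))).map Prod.snd).sum) :=
      hei t le_rfl ht24
    have hnA : n + PySem.List.pyGetD e t 0 = altN adds t k := by
      rw [hread, hn]
      unfold altN
      rw [sum_window_step adds t k]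
      ring
    simp only [solutionLoop, solutionAltLoop]
    rw [hnA]
    by_cases hcond : (altN adds t k + 1) * m ≤ p
    · simp only [hcond, if_pos]
      set add := PySem.Int.floordiv (p - m * altN adds t k) m with hadd
      apply ih
      · omega
      · omega
      · split
        · rw [PySem.List.length_pySetD]; exact he
        · exact he
      · -- n for the next hour over the extended log
        unfold altN
        rw [List.filter_append, List.map_append, List.sum_append]
        have h1 : (([(t, add)] : List (Int × Int)).filter
            (fun ha => decide (t + 1 - 1 - k < ha.1))) = [(t, add)] := by
          simp; omega
        rw [h1]
        have heq : (fun ha : Int × Int => decide (t + 1 - 1 - k < ha.1))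
            = (fun ha : Int × Int => decide (t - k < ha.1)) := by
          funext ha; simp only [decide_eq_decide]; omega
        rw [heq]
        simp
      · intro ha hha
        rcases List.mem_append.mp hha with h | h
        · have := hadds ha h; omega
        · simp at h; subst h; simp
      · intro i hi1 hi2
        have hfilter : (adds ++ [(t, add)]).filter (fun ha => decide (ha.1 + k = i))
            = adds.filter (fun ha => decide (ha.1 + k = i))
              ++ (if t + k = i then [(t, add)] else []) := by
          rw [List.filter_append]; congr 1
          split
          · simp; omega
          · simp; omega
        rw [hfilter]
        by_cases hik : t + k = i
        · -- the slot being written; older batches contribute nothing to it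
          subst hik
          rw [filter_expiry_nil adds t k (t + k) hadds le_rfl]
          rw [if_pos hi2]
          rw [PySem.List.pySetD_of_nonneg e (-add) (by omega)]
          rw [PySem.List.pyGetD_eq_getElem _ 0 (by omega) (by simp [he]; omega)]
          simp
        · -- an unchanged slot
          simp only [hik, if_neg, List.append_nil, not_false_iff]
          rw [← hei i (by omega) hi2]
          split
          · rw [PySem.List.pySetD_of_nonneg e (-add) (by omega)]
            rw [PySem.List.pyGetD_eq_getElem _ 0 (by omega) (by simp [he]; omega),
                PySem.List.pyGetD_eq_getElem e 0 (by omega) (by simp [he]; omega)]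
            have hne : (t + k).toNat ≠ i.toNat := by omega
            simp [hne]
          · rfl
    · simp only [hcond, if_neg, not_false_iff]
      apply ih
      · omega
      · omega
      · exact he
      · unfold altN
        have heq : (fun ha : Int × Int => decide (t + 1 - 1 - k < ha.1))
            = (fun ha : Int × Int => decide (t - k < ha.1)) := by
          funext ha; simp only [decide_eq_decide]; omega
        rw [heq]
      · intro ha hha; have := hadds ha hha; omega
      · intro i hi1 hi2; exact hei i (by omega) hi2

-- with every demand below m neither program ever expands
lemma loopA_no_trigger (m k : Int) :
    ∀ (rest : List Int) (t ans : Int), 0 ≤ t → t + rest.length ≤ 24 →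
    (∀ p ∈ rest, p < m) →
    solutionLoop m k rest t (List.replicate 24 0) ans 0 = ans := by
  intro rest
  induction rest with
  | nil => intro t ans _ _ _; rfl
  | cons p rest ih =>
    intro t ans ht hlen hp
    have hlen' : t + (rest.length : Int) + 1 ≤ 24 := by
      simp only [List.length_cons] at hlen; push_cast at hlen ⊢; omega
    have hget : PySem.List.pyGetD (List.replicate 24 (0 : Int)) t 0 = 0 := by
      rw [PySem.List.pyGetD_eq_getElem (List.replicate 24 (0 : Int)) 0 (by omega)
            (by simp; omega)]
      rw [List.getElem_replicate]
    simp only [solutionLoop, hget]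
    rw [if_neg (by have := hp p (by simp); omega)]
    have h00 : (0 : Int) + 0 = 0 := by ring
    rw [h00]
    exact ih (t + 1) ans (by omega) (by omega) (fun q hq => hp q (by simp [hq]))

lemma loopB_no_trigger (m k : Int) :
    ∀ (rest : List Int) (t ans : Int), (∀ p ∈ rest, p < m) →
    solutionAltLoop m k rest t [] ans = ans := by
  intro rest
  induction rest with
  | nil => intro t ans _; rfl
  | cons p rest ih =>
    intro t ans hp
    have hz : altN ([] : List (Int × Int)) t k = 0 := rfl
    simp only [solutionAltLoop, hz]
    rw [if_neg (by have := hp p (by simp); omega)]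
    exact ih (t + 1) ans (fun q hq => hp q (by simp [hq]))

-- ===== VERDICT (by name: the statement is the Claim_ definition above) =====
theorem solution_spec : Claim_equal_solution := by
  intro players m k _ hpre
  rcases hpre with ⟨hlen, ⟨_, hk⟩ | hall⟩
  case inr =>
    unfold Spec_solution solution solution_alt
    rw [loopA_no_trigger m k players 0 0 (by omega) (by simpa using hlen) hall,
        loopB_no_trigger m k players 0 0 hall]
  unfold Spec_solution solution solution_alt
  apply loops_eq m k hk
  · omega
  · simpa using hlen
  · simp
  · simp [altN]
  · intro ha hha; simp at hha
  · intro i hi1 hi2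
    rw [PySem.List.pyGetD_eq_getElem (List.replicate 24 (0 : Int)) 0 (by omega) (by simp; omega)]
    rw [List.getElem_replicate]
    simp
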